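-- pv_equiv track=rewrite | github.com/kimSooHyun950921/algoritm | soohyun/python/programmers/0426/풍선터트리기/2.py | solution
-- ===== SOURCE A (Python) =====
-- def solution(a):
--     if len(a) >= 3:
--         answer = 2
--         last = len(a)
--         for i in range(1, last-1):
--             if a[i] <= min(a[0:i]) or a[i] <= min(a[i+1:last+1]):
--                 answer += 1
--         return answer
--     else:
--         return len(a)
-- ===== SOURCE B (Python) =====
-- def solution(a):
--     n = len(a)
--     if n < 3:
--         return n
--     # suffix minima: suf[i] = min(a[i:]), built in one right-to-left pass
--     suf = []
--     m = a[-1]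
--     for x in reversed(a):
--         m = min(m, x)
--         suf.append(m)
--     suf.reverse()
--     # forward pass keeping a running prefix minimum
--     ans = 2
--     m = a[0]
--     for i in range(1, n - 1):
--         if a[i] <= m or a[i] <= suf[i + 1]:
--             ans += 1
--         m = min(m, a[i])
--     return ans
-- ===== Notes on version B (the rewrite author's own statement) =====
-- stated objective: faster
-- what changed: B precomputes suffix minima in one right-to-left pass and keeps a running prefix minimum in the forward pass, replacing A's per-index min over two fresh slices.
import Mathlib
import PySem

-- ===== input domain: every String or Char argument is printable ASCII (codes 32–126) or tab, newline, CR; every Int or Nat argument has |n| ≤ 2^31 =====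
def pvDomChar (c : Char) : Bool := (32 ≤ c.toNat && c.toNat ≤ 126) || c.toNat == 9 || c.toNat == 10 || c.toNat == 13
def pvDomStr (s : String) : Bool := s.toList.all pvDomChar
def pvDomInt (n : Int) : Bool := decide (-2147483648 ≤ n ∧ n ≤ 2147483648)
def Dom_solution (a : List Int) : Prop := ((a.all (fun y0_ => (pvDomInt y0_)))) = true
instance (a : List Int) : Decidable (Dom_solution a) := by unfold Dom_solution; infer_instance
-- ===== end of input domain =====

-- B replaces A's per-index slice minima by one suffix-minima pass plus a running
-- prefix minimum (objective: faster); return values are identical on all inputs.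

-- ===== PORT A =====
-- loop body of A's for-loop (answer is the accumulator, i the index)
def stepA (a : List Int) (last : Int) (answer : Int) (i : Int) : Int :=
  if PySem.List.pyGetD a i 0 ≤ (PySem.List.min? (PySem.List.slice a (some 0) (some i)) (fun x => x)).getD 0
     ∨ PySem.List.pyGetD a i 0 ≤ (PySem.List.min? (PySem.List.slice a (some (i+1)) (some (last+1))) (fun x => x)).getD 0
  then answer + 1 else answer
-- (min of an empty list would raise in Python; A's loop range keeps both slices
--  nonempty, so the .getD 0 default is never the value used)

def solution (a : List Int) : Int :=
  if (a.length : Int) ≥ 3 then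
    let last : Int := (a.length : Int)
    (PySem.List.pyRange 1 (last - 1) 1).foldl (stepA a last) 2
  else (a.length : Int)

-- ===== PORT B =====
-- right-to-left pass of Source B: state (m, suffix minima so far); consing to the
-- front fuses Source B's append-then-final-reverse
def sufStep (p : Int × List Int) (x : Int) : Int × List Int :=
  (min p.1 x, min p.1 x :: p.2)

-- forward pass of Source B: state (ans, running prefix minimum m)
def stepB (a : List Int) (suf : List Int) (p : Int × Int) (i : Int) : Int × Int :=
  ((if PySem.List.pyGetD a i 0 ≤ p.2 ∨ PySem.List.pyGetD a i 0 ≤ PySem.List.pyGetD suf (i+1) 0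
    then p.1 + 1 else p.1),
   min p.2 (PySem.List.pyGetD a i 0))

def solution_alt (a : List Int) : Int :=
  let n : Int := (a.length : Int)
  if n < 3 then n
  else
    let suf := (a.reverse.foldl sufStep (PySem.List.pyGetD a (-1) 0, [])).2
    ((PySem.List.pyRange 1 (n - 1) 1).foldl (stepB a suf) (2, PySem.List.pyGetD a 0 0)).1

-- ===== PRECONDITION & SPEC =====
def Spec_solution (a : List Int) (out : Int) : Prop := out = solution_alt a
instance (a : List Int) (out : Int) : Decidable (Spec_solution a out) := by unfold Spec_solution; infer_instance

-- ===== CLAIM (what is proved, stated in full; the proofs are below) =====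
def Claim_equal_solution : Prop := ∀ (a : List Int), Dom_solution a → Spec_solution a (solution a)

-- ===== LEMMAS AND PROOFS =====

-- min of a nonempty list as Python's min(xs) computes it; 0 on [] (never used there)
def mfold : List Int → Int
  | [] => 0
  | x :: xs => xs.foldl min x

-- minimum of l with final seed c, folded from the right
def rmin (c : Int) : List Int → Int
  | [] => c
  | x :: xs => min (rmin c xs) x

-- the list of right-to-left running minima of l with final seed c
def rtm (c : Int) : List Int → List Int
  | [] => []
  | x :: xs => min (rmin c xs) x :: rtm c xs

theorem foldl_min_min (ys : List Int) : ∀ (x y : Int), ys.foldl min (min x y) = min x (ys.foldl min y) := by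
  induction ys with
  | nil => intro x y; rfl
  | cons z zs ih =>
    intro x y
    simp only [List.foldl_cons, min_assoc]
    exact ih x (min y z)

theorem mfold_cons_of_ne (x : Int) (xs : List Int) (h : xs ≠ []) :
    mfold (x :: xs) = min x (mfold xs) := by
  cases xs with
  | nil => exact absurd rfl h
  | cons y ys => simp only [mfold, List.foldl_cons]; exact foldl_min_min ys x y

theorem mfold_append_singleton (l : List Int) (x : Int) :
    mfold (l ++ [x]) = if l = [] then x else min (mfold l) x := by
  cases l with
  | nil => simp [mfold]
  | cons y ys => simp [mfold, List.foldl_append]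

theorem min?_getD_eq_mfold (l : List Int) :
    (PySem.List.min? l (fun x => x)).getD 0 = mfold l := by
  cases l with
  | nil => rfl
  | cons x t => rw [PySem.List.min?_id_cons]; rfl

theorem foldr_suf (c : Int) (l : List Int) : ∀ acc : List Int,
    l.foldr (fun x p => sufStep p x) (c, acc) = (rmin c l, rtm c l ++ acc) := by
  induction l with
  | nil => intro acc; rfl
  | cons x xs ih =>
    intro acc
    simp only [List.foldr_cons]
    rw [ih acc]
    rfl

theorem rmin_getLast (l : List Int) (h : l ≠ []) : rmin (l.getLast h) l = mfold l := by
  induction l with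
  | nil => exact absurd rfl h
  | cons x xs ih =>
    cases xs with
    | nil => simp [rmin, mfold]
    | cons y ys =>
      rw [List.getLast_cons (by simp : (y :: ys) ≠ [])]
      show min (rmin ((y :: ys).getLast (by simp)) (y :: ys)) x = mfold (x :: y :: ys)
      rw [ih (by simp), mfold_cons_of_ne x (y :: ys) (by simp), min_comm]

theorem rtm_getElem? (c : Int) (l : List Int) : ∀ j : Nat, j < l.length →
    (rtm c l)[j]? = some (rmin c (l.drop j)) := by
  induction l with
  | nil => intro j h; simp at h
  | cons x xs ih =>
    intro j h
    cases j with
    | zero => rfl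
    | succ j => simpa [rtm] using ih j (by simpa using h)

theorem suf_eq_rtm (a : List Int) (h : a ≠ []) :
    (a.reverse.foldl sufStep (PySem.List.pyGetD a (-1) 0, [])).2 = rtm (a.getLast h) a := by
  rw [show PySem.List.pyGetD a (-1) 0 = a.getLast h from PySem.List.pyGetD_neg_one (xs := a) (d := 0) h,
      List.foldl_reverse]
  show (a.foldr (fun x p => sufStep p x) (a.getLast h, [])).2 = _
  rw [foldr_suf]
  simp

theorem suf_lookup (a : List Int) (h : a ≠ []) (j : Nat) (hj : j < a.length) :
    PySem.List.pyGetD (rtm (a.getLast h) a) (j : Int) 0 = mfold (a.drop j) := by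
  have hd : a.drop j ≠ [] := by
    intro he
    have := List.length_drop (l := a) (i := j)
    rw [he] at this
    simp at this
    omega
  have h1 : (rtm (a.getLast h) a)[j]? = some (rmin (a.getLast h) (a.drop j)) :=
    rtm_getElem? _ a j hj
  rw [PySem.List.pyGetD_natCast]
  rw [List.getD_eq_getElem?_getD, h1]
  simp only [Option.getD_some]
  rw [← List.getLast_drop (h := hd)]
  exact rmin_getLast _ hd

theorem mfold_take_succ (a : List Int) (j : Nat) (hj : j < a.length) (h1 : 1 ≤ j) :
    mfold (a.take (j+1)) = min (mfold (a.take j)) (a.getD j 0) := by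
  rw [List.take_succ_eq_append_getElem hj, mfold_append_singleton,
      List.getD_eq_getElem a 0 hj]
  have hne : a.take j ≠ [] := by
    intro he
    rcases List.take_eq_nil_iff.mp he with h0 | h0
    · omega
    · rw [h0] at hj; simp at hj
  simp [hne]

-- the joint loop invariant: after processing indices 1..k, A's counter equals B's,
-- and B's running m is the minimum of a[:k+1]
theorem loop_inv (a : List Int) (h3 : 3 ≤ a.length) (ha : a ≠ [])
    (suf : List Int) (hs : suf = rtm (a.getLast ha) a) :
    ∀ k : Nat, k ≤ a.length - 2 →
    ((PySem.List.pyRange 1 (1 + (k:Int)) 1).foldl (stepB a suf) (2, PySem.List.pyGetD a 0 0)).2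
        = mfold (a.take (k+1))
    ∧ (PySem.List.pyRange 1 (1 + (k:Int)) 1).foldl (stepA a (a.length:Int)) 2
        = ((PySem.List.pyRange 1 (1 + (k:Int)) 1).foldl (stepB a suf) (2, PySem.List.pyGetD a 0 0)).1 := by
  intro k
  induction k with
  | zero =>
    intro _
    rw [show (1 + ((0:Nat):Int)) = 1 by norm_num, PySem.List.pyRange_one_eq_nil le_rfl]
    simp only [List.foldl_nil]
    refine ⟨?_, trivial⟩
    cases a with
    | nil => exact absurd rfl ha
    | cons x xs => simp [PySem.List.pyGetD_zero, mfold]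
  | succ k ih =>
    intro hk
    have hk' : k ≤ a.length - 2 := by omega
    obtain ⟨ih2, ih1⟩ := ih hk'
    have hcast : (1 + ((k+1:Nat):Int)) = (1 + (k:Int)) + 1 := by push_cast; ring
    rw [hcast, PySem.List.pyRange_one_succ_right (by omega : (1:Int) ≤ 1 + (k:Int)),
        List.foldl_append, List.foldl_append]
    simp only [List.foldl_cons, List.foldl_nil]
    -- the index being processed
    have hidx : (1 + (k:Int)) = ((k+1 : Nat) : Int) := by push_cast; ring
    have hklen : k + 1 < a.length := by omega
    have hk2len : k + 2 < a.length := by omega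
    -- a[i]
    have hai : PySem.List.pyGetD a (1 + (k:Int)) 0 = a.getD (k+1) 0 := by
      rw [hidx, PySem.List.pyGetD_natCast]
    -- left slice minimum = running prefix minimum
    have hleft : (PySem.List.min? (PySem.List.slice a (some 0) (some (1 + (k:Int)))) (fun x => x)).getD 0
        = mfold (a.take (k+1)) := by
      rw [hidx]
      rw [PySem.List.slice_zero_start, PySem.List.slice_to_natCast]
      exact min?_getD_eq_mfold _
    -- right slice minimum = suffix minimum
    have hright : (PySem.List.min? (PySem.List.slice a (some ((1 + (k:Int)) + 1)) (some ((a.length:Int)+1))) (fun x => x)).getD 0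
        = mfold (a.drop (k+2)) := by
      have e1 : ((1 + (k:Int)) + 1) = ((k+2 : Nat) : Int) := by push_cast; ring
      have e2 : ((a.length:Int)+1) = ((a.length + 1 : Nat) : Int) := by push_cast; ring
      rw [e1, e2, PySem.List.slice_natCast]
      rw [List.take_of_length_le (by simp; omega)]
      exact min?_getD_eq_mfold _
    -- B's suffix table lookup
    have hsuf : PySem.List.pyGetD suf ((1 + (k:Int)) + 1) 0 = mfold (a.drop (k+2)) := by
      have e1 : ((1 + (k:Int)) + 1) = ((k+2 : Nat) : Int) := by push_cast; ring
      rw [e1, hs]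
      exact suf_lookup a ha (k+2) hk2len
    constructor
    · -- new running minimum
      show (stepB a suf _ _).2 = _
      simp only [stepB, ih2, hai]
      rw [mfold_take_succ a (k+1) hklen (by omega)]
    · -- counters stay equal
      show stepA a (a.length:Int) _ _ = (stepB a suf _ _).1
      simp only [stepA, stepB, ih1, ih2, hai, hleft, hright, hsuf]

theorem main_eq (a : List Int) : solution a = solution_alt a := by
  unfold solution solution_alt
  by_cases h : (a.length : Int) ≥ 3
  · have h3 : 3 ≤ a.length := by exact_mod_cast h
    have ha : a ≠ [] := by intro he; rw [he] at h3; simp at h3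
    rw [if_pos h, if_neg (by omega : ¬ (a.length:Int) < 3)]
    rw [suf_eq_rtm a ha]
    have hcast : (1 + ((a.length - 2 : Nat) : Int)) = (a.length : Int) - 1 := by
      have : ((a.length - 2 : Nat) : Int) = (a.length : Int) - 2 := by omega
      omega
    have := (loop_inv a h3 ha (rtm (a.getLast ha) a) rfl (a.length - 2) le_rfl).2
    rw [hcast] at this
    exact this
  · rw [if_neg h, if_pos (by omega : (a.length:Int) < 3)]

-- ===== VERDICT (by name: the statement is the Claim_ definition above) =====
theorem solution_spec : Claim_equal_solution := by
  intro a _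
  unfold Spec_solution
  exact main_eq a
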